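-- pv_equiv track=rewrite | github.com/TylerMorley/advent-of-code | 2024/day06/day06.py | moveToObstacle
-- ===== SOURCE A (Python) =====
-- def moveToObstacle(floormap, cur_location):
--     y,x = cur_location
--     indices = [i for i,v in enumerate(floormap[y]) if v == '#' and i < x]
--     if len(indices) > 0:
--         new_x = max(indices) + 1
--     else:
--         new_x = 0
--
--     floormap[y][new_x:x+1] = ['X' for i in floormap[y][new_x:x+1]]
--     return [floormap, [y,new_x]]
-- ===== SOURCE B (Python) =====
-- def moveToObstacle(floormap, cur_location):
--     y, x = cur_location
--     row = floormap[y]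
--     new_x = 0
--     i = min(x, len(row)) - 1
--     while i >= 0:
--         if row[i] == '#':
--             new_x = i + 1
--             break
--         i -= 1
--     row[new_x:x + 1] = ['X'] * len(row[new_x:x + 1])
--     return [floormap, [y, new_x]]
-- ===== Notes on version B (the rewrite author's own statement) =====
-- stated objective: alternative
-- what changed: A builds the full list of all '#' indices left of x via enumerate and takes its max; B scans backward from min(x, len(row))-1 and stops at the first '#', so the index collection and max pass disappear (the identical slice-assignment marking is kept).
import Mathlib
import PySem

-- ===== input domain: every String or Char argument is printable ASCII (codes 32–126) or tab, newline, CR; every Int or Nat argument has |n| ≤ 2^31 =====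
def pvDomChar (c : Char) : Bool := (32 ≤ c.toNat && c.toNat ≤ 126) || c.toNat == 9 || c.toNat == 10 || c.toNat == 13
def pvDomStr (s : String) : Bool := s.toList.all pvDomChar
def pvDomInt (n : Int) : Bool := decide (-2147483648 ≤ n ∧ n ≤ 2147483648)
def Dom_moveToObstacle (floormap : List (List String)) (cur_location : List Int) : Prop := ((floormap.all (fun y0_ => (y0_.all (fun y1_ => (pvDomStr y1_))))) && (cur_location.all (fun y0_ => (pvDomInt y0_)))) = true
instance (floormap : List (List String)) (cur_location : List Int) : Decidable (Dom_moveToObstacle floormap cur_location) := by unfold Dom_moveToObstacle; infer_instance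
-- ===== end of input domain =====

-- B replaces A's build-all-'#'-indices-then-max pass by a single backward early-exit scan; the
-- identical slice-assignment marking is shared (both Pythons mutate floormap[y] in place; the
-- equivalence proved is about the returned value, which contains the mutated map).

-- shared helper: the slice assignment floormap[y][a:b] = ['X'] * len(floormap[y][a:b]),
-- identical in both Pythons (Python slice-assignment clamping semantics)
def markSlice (row : List String) (a b : Int) : List String :=
  let seg := PySem.List.slice row (some a) (some b)
  let a' := PySem.List.clampIdx row.length a
  let b' := max a' (PySem.List.clampIdx row.length b)
  row.take a' ++ seg.map (fun _ => "X") ++ row.drop b'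

-- ===== PORT A =====
def moveToObstacle (floormap : List (List String)) (cur_location : List Int) : List (List String) × List Int :=
  match cur_location with
  | [y, x] =>
    match PySem.List.pyGet? floormap y with
    | some row =>
      let indices : List Int :=
        ((PySem.List.enumerate row).filter (fun p => p.2 == "#" && decide (p.1 < x))).map (fun p => p.1)
      let new_x : Int := if indices.length > 0 then (PySem.List.max? indices (fun i => i)).getD 0 + 1 else 0
      (PySem.List.pySetD floormap y (markSlice row new_x (x + 1)), [y, new_x])
    | none => (floormap, cur_location)
  | _ => (floormap, cur_location)

-- ===== PORT B =====
-- the backward while-loop: scanBack row k inspects indices k-1, k-2, …, 0 and stops at the first '#'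
def scanBack (row : List String) : Nat → Int
  | 0 => 0
  | (k+1) => if PySem.List.pyGetD row (k : Int) "" == "#" then (k : Int) + 1 else scanBack row k

def moveToObstacle_alt (floormap : List (List String)) (cur_location : List Int) : List (List String) × List Int :=
  if 2 ≤ cur_location.length then
    let y := cur_location.getD 0 0
    let x := cur_location.getD 1 0
    let row := (PySem.List.pyGet? floormap y).getD []
    let new_x : Int := scanBack row (min x (PySem.List.len row)).toNat
    (PySem.List.pySetD floormap y (markSlice row new_x (x + 1)), [y, new_x])
  else (floormap, cur_location)

-- ===== PRECONDITION & SPEC =====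
-- Pre_ excludes exactly the inputs where the Python A raises: a cur_location that is not a pair
-- (unpacking raises ValueError) and a row index y outside floormap (IndexError).
def Pre_moveToObstacle (floormap : List (List String)) (cur_location : List Int) : Prop :=
  cur_location.length = 2 ∧ PySem.Raise.InRange floormap.length (cur_location.getD 0 0)
instance (floormap : List (List String)) (cur_location : List Int) : Decidable (Pre_moveToObstacle floormap cur_location) := by unfold Pre_moveToObstacle; infer_instance

def pvWitness_moveToObstacle : List (List String) × List Int := ([[".", "#", ".", "."]], [0, 3])

def Spec_moveToObstacle (floormap : List (List String)) (cur_location : List Int) (out : List (List String) × List Int) : Prop := out = moveToObstacle_alt floormap cur_location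
instance (floormap : List (List String)) (cur_location : List Int) (out : List (List String) × List Int) : Decidable (Spec_moveToObstacle floormap cur_location out) := by unfold Spec_moveToObstacle; infer_instance

-- ===== CLAIM (what is proved, stated in full; the proofs are below) =====
def Claim_equal_moveToObstacle : Prop := ∀ (floormap : List (List String)) (cur_location : List Int), Dom_moveToObstacle floormap cur_location → Pre_moveToObstacle floormap cur_location → Spec_moveToObstacle floormap cur_location (moveToObstacle floormap cur_location)

-- ===== LEMMAS AND PROOFS =====

-- the Python max of a list all of whose elements are below an appended last element is that element
def maxStep (acc : Option Int) (x : Int) : Option Int :=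
  match acc with
  | none => some x
  | some m => if m < x then some x else some m

lemma max?_eq_foldl_maxStep (xs : List Int) :
    PySem.List.max? xs (fun i => i) = List.foldl maxStep none xs := by
  unfold PySem.List.max?
  congr 1
  funext acc x
  cases acc <;> simp [maxStep]

lemma foldl_maxStep_lt (ys : List Int) (k : Int) (acc : Option Int)
    (h : ∀ a ∈ ys, a < k) (hacc : ∀ m, acc = some m → m < k) :
    ∀ m, List.foldl maxStep acc ys = some m → m < k := by
  induction ys generalizing acc with
  | nil => intro m hm; exact hacc m (by simpa using hm)
  | cons a t ih =>
    intro m hm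
    have ha : a < k := h a List.mem_cons_self
    refine ih (maxStep acc a) (fun b hb => h b (List.mem_cons_of_mem _ hb)) ?_ m (by simpa using hm)
    intro m' hm'
    cases acc with
    | none => simp [maxStep] at hm'; omega
    | some m0 =>
      have hm0 : m0 < k := hacc m0 rfl
      simp only [maxStep] at hm'
      split at hm' <;> (simp only [Option.some.injEq] at hm'; omega)

lemma max?_append_singleton_lt (xs : List Int) (k : Int) (h : ∀ a ∈ xs, a < k) :
    PySem.List.max? (xs ++ [k]) (fun i => i) = some k := by
  rw [max?_eq_foldl_maxStep, List.foldl_append]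
  cases hres : List.foldl maxStep none xs with
  | none => simp [maxStep]
  | some m =>
    have hmk := foldl_maxStep_lt xs k none h (by intro m hm; cases hm) m hres
    simp [maxStep, hmk]

-- A's index list, rewritten over Nat ranges with the bound already clamped
lemma indices_eq (row : List String) (x : Int) :
    ((PySem.List.enumerate row).filter (fun p => p.2 == "#" && decide (p.1 < x))).map (fun p => p.1)
      = ((List.range (min x (PySem.List.len row)).toNat).filter
          (fun i => row.getD i "" == "#")).map (fun (i : Nat) => (i : Int)) := by
  rw [PySem.List.enumerate_eq_map_pyRange row "", PySem.List.pyRange_one]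
  rw [List.filter_map, List.map_map]
  rw [List.filter_map, List.map_map]
  simp only [Function.comp_def, zero_add, PySem.List.pyGetD_natCast, PySem.List.len_eq,
    Int.sub_zero, Int.toNat_natCast]
  set K := (min x ((row.length : Nat) : Int)).toNat with hKdef
  have hK : K ≤ row.length := by omega
  rw [show row.length = K + (row.length - K) by omega, List.range_add]
  simp only [List.filter_append, List.map_append]
  have h2 : List.filter (fun i : Nat => row.getD i "" == "#" && decide ((i : Int) < x))
      (List.map (fun i => K + i) (List.range (row.length - K))) = [] := by
    rw [List.filter_eq_nil_iff]
    intro a ha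
    simp only [List.mem_map, List.mem_range] at ha
    obtain ⟨j, hj, rfl⟩ := ha
    have hx : ¬ ((K + j : Nat) : Int) < x := by push_cast; omega
    simp only [hx, decide_false, Bool.and_false]
    decide
  rw [h2]
  have h1 : List.filter (fun i : Nat => row.getD i "" == "#" && decide ((i : Int) < x)) (List.range K)
      = List.filter (fun i => row.getD i "" == "#") (List.range K) := by
    apply List.filter_congr
    intro i hi
    simp only [List.mem_range] at hi
    have hx : ((i : Nat) : Int) < x := by omega
    simp [hx]
  rw [h1]
  simp

-- the backward scan computes A's "max index + 1, else 0"
lemma scanBack_eq (row : List String) (k : Nat) :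
    (if (((List.range k).filter (fun i => row.getD i "" == "#")).map (fun (i : Nat) => (i : Int))).length > 0
     then (PySem.List.max? (((List.range k).filter (fun i => row.getD i "" == "#")).map (fun (i : Nat) => (i : Int))) (fun i => i)).getD 0 + 1
     else 0) = scanBack row k := by
  induction k with
  | zero => simp [scanBack]
  | succ k ih =>
    simp only [List.range_succ, List.filter_append]
    by_cases h : row.getD k "" == "#"
    · have h' : row[k]?.getD "" = "#" := by simpa [List.getD] using h
      have hfil : List.filter (fun i => row.getD i "" == "#") [k] = [k] := by simp [List.getD, h']
      simp only [hfil, List.map_append]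
      have hmax := max?_append_singleton_lt
        (((List.range k).filter (fun i => row.getD i "" == "#")).map (fun (i : Nat) => (i : Int))) (k : Int)
        (by
          intro a ha
          simp only [List.mem_map, List.mem_filter, List.mem_range] at ha
          obtain ⟨i, ⟨hi, _⟩, rfl⟩ := ha
          exact_mod_cast hi)
      simp only [List.map_cons, List.map_nil] at hmax ⊢
      simp only [List.getD] at hmax
      simp [scanBack, List.getD, h', hmax]
    · have h' : ¬ row[k]?.getD "" = "#" := by simpa [List.getD] using h
      have hfil : List.filter (fun i => row.getD i "" == "#") [k] = [] := by simp [List.getD, h']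
      simp only [hfil, List.map_append]
      simp only [List.map_nil, List.append_nil]
      rw [ih]
      simp [scanBack, List.getD, h']

-- ===== VERDICT (by name: the statement is the Claim_ definition above) =====
theorem moveToObstacle_spec : Claim_equal_moveToObstacle := by
  intro floormap cur_location _ hpre
  obtain ⟨hlen, hin⟩ := hpre
  match cur_location with
  | [] => simp at hlen
  | [a] => simp at hlen
  | a :: b :: c :: t => simp at hlen
  | [y, x] =>
    unfold Spec_moveToObstacle
    simp only [moveToObstacle, moveToObstacle_alt]
    have hinY : PySem.Raise.InRange floormap.length y := by simpa using hin
    cases hg : PySem.List.pyGet? floormap y with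
    | none =>
      exact absurd hinY ((PySem.List.pyGet?_eq_none_iff floormap y).mp hg)
    | some row =>
      simp only [Option.getD_some, List.length_cons, List.length_nil, List.getD,
        List.getElem?_cons_zero, List.getElem?_cons_succ, if_pos (by omega : (2:Nat) ≤ 0 + 1 + 1)]
      rw [hg]
      simp only [Option.getD_some]
      rw [indices_eq row x, ← scanBack_eq row (min x (PySem.List.len row)).toNat]
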